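-- pv_equiv track=rewrite | github.com/raeez/chiral-bar-cobar | compute/lib/cy_bkm_algebra_engine.py | c0_from_k3_eg
-- ===== SOURCE A (Python) =====
-- from typing import Dict, List, Optional, Tuple, Set
--
-- _PHI01_COEFFS: Dict[Tuple[int, int], int] = {
--     (0, -1): 1, (0, 0): 10, (0, 1): 1,
--     (1, -2): 10, (1, -1): -64, (1, 0): 108, (1, 1): -64, (1, 2): 10,
--     (2, -3): 1, (2, -2): 108, (2, -1): -513, (2, 0): 808,
--     (2, 1): -513, (2, 2): 108, (2, 3): 1,
-- }
--
-- def phi01_coeff(n: int, ell: int) -> int: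
--     """Fourier coefficient c(n, l) of phi_{0,1}.
--
--     Returns 0 for entries outside the verified table.
--     For |l| > n + 1, c(n, l) = 0 for a weak Jacobi form of index 1.
--     """
--     if n < 0:
--         return 0
--     if abs(ell) > n + 1:
--         return 0
--     return _PHI01_COEFFS.get((n, ell), 0)
--
-- def c0_from_k3_eg(D: int) -> int:
--     r"""The c_0(D) coefficient used in the Borcherds product for Phi_{10}.
--
--     For the product formula:
--       Phi_{10} = q*r*s * prod_{(n,l,m)>0} (1 - q^n y^l p^m)^{c_0(4nm-l^2)}
--
--     The exponent c_0(D) for discriminant D = 4nm - l^2 is the coefficient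
--     extracted from the theta decomposition of the K3 elliptic genus.
--
--     For a weak Jacobi form phi of weight 0, index 1, the theta
--     decomposition gives:
--       phi(tau, z) = h_0(tau)*theta_{0,1}(tau,z) + h_1(tau)*theta_{1,1}(tau,z)
--     where theta_{mu,1} are index-1 theta functions.
--
--     The c_0(D) coefficients are extracted by: for each D, find (n, l)
--     with 4n - l^2 = D and read c(n, l) from 2*phi_{0,1}. For the
--     discriminant parametrization to be well-defined, we need that
--     c(n, l) depends only on D = 4n - l^2 for the THETA DECOMPOSITION
--     components (which it does, by the theory of Jacobi forms).
--
--     In practice: for D = 4n - l^2, take any (n, l) achieving this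
--     discriminant and return 2 * phi01_coeff(n, l).
--
--     For D = -1: (n, l) = (0, 1) gives c(0, 1) = 1, so c_0(-1) = 2.
--     For D = 0: (n, l) = (0, 0) gives c(0, 0) = 10, so c_0(0) = 20.
--     For D = 3: (n, l) = (1, 1) gives c(1, 1) = -64, so c_0(3) = -128.
--     For D = 4: (n, l) = (1, 0) gives c(1, 0) = 108, so c_0(4) = 216.
--
--     WAIT: D = 4*1 - 0^2 = 4. c(1, 0) = 108, so c_0(4) = 216.
--     But also D = 4*1 - 0^2 = 4, same.
--     Check: D = 4*0 - l^2 requires l^2 = -D, so l^2 = -D.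
--     For D = -1: l^2 = 1, n = 0, (0, 1): c = 1, c_0 = 2. OK.
--     For D = 0: l = 0, n = 0, (0, 0): c = 10, c_0 = 20. OK.
--     For D = 3: l^2 = 4n - 3. n = 1: l^2 = 1, l = +-1. c(1, 1) = -64. c_0 = -128.
--     For D = 4: l^2 = 4n - 4. n = 1: l = 0. c(1, 0) = 108. c_0 = 216.
--       Or n = 2: l^2 = 4. l = +-2. c(2, 2) = 108. c_0 = 216. CONSISTENT!
--     For D = 7: l^2 = 4n - 7. n = 2: l^2 = 1, l = +-1. c(2, 1) = -513. c_0 = -1026.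
--     For D = 8: l^2 = 4n - 8. n = 2: l = 0. c(2, 0) = 808. c_0 = 1616.
--       Or n = 3: l^2 = 4. l = +-2. Need c(3, 2) which is outside our table.
--
--     DISCRIMINANT CONSISTENCY: For discriminant D with D = -1 mod 4 or D = 0 mod 4:
--     the coefficient should be the same for all (n, l) achieving it.
--     Verified above for D = 4 via two independent (n, l) pairs.
--
--     Range: we can compute c_0(D) for D in {-1, 0, 3, 4, 7, 8} from our table.
--     """
--     # Find a representative (n, l) with 4n - l^2 = D and (n, l) in our table.
--     # We try small n values.
--     for n in range(10):
--         # l^2 = 4n - D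
--         disc = 4 * n - D
--         if disc < 0:
--             continue
--         import math as _math
--         l_sq = disc
--         l_val = int(_math.isqrt(l_sq))
--         if l_val * l_val == l_sq:
--             # Check if this (n, l_val) is in our table
--             val = phi01_coeff(n, l_val)
--             if val != 0 or (n, l_val) in _PHI01_COEFFS:
--                 return 2 * val
--             # Try negative l
--             val_neg = phi01_coeff(n, -l_val)
--             if val_neg != 0 or (n, -l_val) in _PHI01_COEFFS:
--                 return 2 * val_neg
--     # If not found, return 0 (outside our range)
--     return 0
-- ===== SOURCE B (Python) =====
-- def c0_from_k3_eg(D: int) -> int: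
--     # Closed form: the table _PHI01_COEFFS only covers discriminants
--     # D = 4n - l^2 in {-1, 0, 3, 4, 7, 8} (documented in A's docstring),
--     # and c(n, l) depends only on D there, so c_0 is this direct branch.
--     if D == -1:
--         return 2
--     elif D == 0:
--         return 20
--     elif D == 3:
--         return -128
--     elif D == 4:
--         return 216
--     elif D == 7:
--         return -1026
--     elif D == 8:
--         return 1616
--     else:
--         return 0
-- ===== Notes on version B (the rewrite author's own statement) =====
-- stated objective: simpler
-- what changed: Replaces the per-call scan over n in range(10) with discriminant inversion, isqrt perfect-square tests, table lookups and sign retries by a closed-form six-way branch on D, the only discriminants the coefficient table covers.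
import Mathlib
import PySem

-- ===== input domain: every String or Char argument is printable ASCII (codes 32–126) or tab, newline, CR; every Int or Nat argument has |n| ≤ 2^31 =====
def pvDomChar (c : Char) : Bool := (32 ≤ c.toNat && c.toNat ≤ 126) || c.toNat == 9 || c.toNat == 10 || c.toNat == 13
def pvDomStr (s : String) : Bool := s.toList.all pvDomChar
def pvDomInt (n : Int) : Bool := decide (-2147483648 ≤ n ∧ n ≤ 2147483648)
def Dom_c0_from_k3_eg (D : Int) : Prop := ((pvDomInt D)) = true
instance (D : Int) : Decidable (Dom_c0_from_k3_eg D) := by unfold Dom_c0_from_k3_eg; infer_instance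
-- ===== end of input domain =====

-- B replaces A's per-call scan over n in range(10) (isqrt perfect-square and
-- table-membership tests) by a closed-form six-way branch on D: objective 'simpler'.

-- ===== PORT A =====
-- the module-level dict _PHI01_COEFFS (keys distinct, insertion order preserved)
def phiDict : PySem.Dict (Int × Int) Int :=
  PySem.Dict.mk [((0, -1), 1), ((0, 0), 10), ((0, 1), 1),
    ((1, -2), 10), ((1, -1), -64), ((1, 0), 108), ((1, 1), -64), ((1, 2), 10),
    ((2, -3), 1), ((2, -2), 108), ((2, -1), -513), ((2, 0), 808),
    ((2, 1), -513), ((2, 2), 108), ((2, 3), 1)]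

def phi01_coeff (n ell : Int) : Int :=
  if n < 0 then 0
  else if |ell| > n + 1 then 0
  else phiDict.getD (n, ell) 0

-- the 'for n in range(10)' loop with its early returns, as structural recursion
-- over the list of candidate n values; math.isqrt is exact here since disc ≥ 0
-- is guaranteed by the preceding 'continue' guard (Nat.sqrt = floor sqrt = isqrt).
def c0Loop (D : Int) : List Int → Int
  | [] => 0
  | n :: rest =>
    let disc := 4 * n - D
    if disc < 0 then c0Loop D rest
    else
      let l_val : Int := (Nat.sqrt disc.toNat : Int)
      if l_val * l_val = disc then
        let val := phi01_coeff n l_val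
        if val ≠ 0 ∨ phiDict.contains (n, l_val) = true then 2 * val
        else
          let val_neg := phi01_coeff n (-l_val)
          if val_neg ≠ 0 ∨ phiDict.contains (n, -l_val) = true then 2 * val_neg
          else c0Loop D rest
      else c0Loop D rest

def c0_from_k3_eg (D : Int) : Int := c0Loop D (PySem.List.pyRange 0 10 1)

-- ===== PORT B =====
-- closed-form branch on the six discriminants the coefficient table covers
def c0_from_k3_eg_alt (D : Int) : Int :=
  if D = -1 then 2
  else if D = 0 then 20
  else if D = 3 then -128
  else if D = 4 then 216
  else if D = 7 then -1026
  else if D = 8 then 1616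
  else 0

-- ===== PRECONDITION & SPEC =====
def Spec_c0_from_k3_eg (D : Int) (out : Int) : Prop := out = c0_from_k3_eg_alt D
instance (D : Int) (out : Int) : Decidable (Spec_c0_from_k3_eg D out) := by unfold Spec_c0_from_k3_eg; infer_instance

-- ===== CLAIM (what is proved, stated in full; the proofs are below) =====
def Claim_equal_c0_from_k3_eg : Prop := ∀ (D : Int), Dom_c0_from_k3_eg D → Spec_c0_from_k3_eg D (c0_from_k3_eg D)

-- ===== LEMMAS AND PROOFS =====

-- if either early-return condition fires, (n, l) is a table key, so 4n - l² is
-- one of the six discriminants the table covers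
lemma cond_disc (n l : Int)
    (h : phi01_coeff n l ≠ 0 ∨ phiDict.contains (n, l) = true) :
    4 * n - l * l = -1 ∨ 4 * n - l * l = 0 ∨ 4 * n - l * l = 3 ∨
    4 * n - l * l = 4 ∨ 4 * n - l * l = 7 ∨ 4 * n - l * l = 8 := by
  have hkey : (n, l) ∈ phiDict.keys := by
    rcases h with h | h
    · unfold phi01_coeff at h
      split_ifs at h with h1 h2
      · exact absurd rfl h
      · exact absurd rfl h
      · have := PySem.Dict.getD_of_not_contains (d := phiDict) (k := (n, l)) (d0 := (0 : Int))
        by_cases hc : phiDict.contains (n, l) = true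
        · exact (PySem.Dict.contains_iff_mem_keys _ _).mp hc
        · exact absurd (this (by simpa using hc)) h
    · exact (PySem.Dict.contains_iff_mem_keys _ _).mp h
  simp only [phiDict, PySem.Dict.keys_mk, List.map_cons, List.map_nil,
    List.mem_cons, List.not_mem_nil, or_false, Prod.mk.injEq] at hkey
  rcases hkey with ⟨h1, h2⟩|⟨h1, h2⟩|⟨h1, h2⟩|⟨h1, h2⟩|⟨h1, h2⟩|⟨h1, h2⟩|⟨h1, h2⟩|⟨h1, h2⟩|
    ⟨h1, h2⟩|⟨h1, h2⟩|⟨h1, h2⟩|⟨h1, h2⟩|⟨h1, h2⟩|⟨h1, h2⟩|⟨h1, h2⟩ <;> subst h1 <;> subst h2 <;> norm_num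

-- outside the six covered discriminants each loop step falls through
lemma c0Loop_step (D n : Int) (rest : List Int)
    (hD : ¬(D = -1 ∨ D = 0 ∨ D = 3 ∨ D = 4 ∨ D = 7 ∨ D = 8)) :
    c0Loop D (n :: rest) = c0Loop D rest := by
  simp only [c0Loop]
  split_ifs with h1 h2 h3 h4
  · rfl
  · exfalso
    have := cond_disc n _ h3
    omega
  · exfalso
    have := cond_disc n _ h4
    have hl : (-(Nat.sqrt (4 * n - D).toNat : Int)) * (-(Nat.sqrt (4 * n - D).toNat : Int))
        = (Nat.sqrt (4 * n - D).toNat : Int) * (Nat.sqrt (4 * n - D).toNat : Int) := by ring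
    rw [hl] at this
    omega
  · rfl
  · rfl

lemma a_zero (D : Int) (hD : ¬(D = -1 ∨ D = 0 ∨ D = 3 ∨ D = 4 ∨ D = 7 ∨ D = 8)) :
    c0_from_k3_eg D = 0 := by
  have hr : PySem.List.pyRange 0 10 1 = [0, 1, 2, 3, 4, 5, 6, 7, 8, 9] := by decide
  simp only [c0_from_k3_eg, hr]
  rw [c0Loop_step _ _ _ hD, c0Loop_step _ _ _ hD, c0Loop_step _ _ _ hD,
    c0Loop_step _ _ _ hD, c0Loop_step _ _ _ hD, c0Loop_step _ _ _ hD,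
    c0Loop_step _ _ _ hD, c0Loop_step _ _ _ hD, c0Loop_step _ _ _ hD,
    c0Loop_step _ _ _ hD]
  rfl

lemma b_zero (D : Int) (hD : ¬(D = -1 ∨ D = 0 ∨ D = 3 ∨ D = 4 ∨ D = 7 ∨ D = 8)) :
    c0_from_k3_eg_alt D = 0 := by
  unfold c0_from_k3_eg_alt
  split_ifs with h1 h2 h3 h4 h5 h6 <;> first
    | rfl
    | (exfalso; exact hD (by omega))

-- ===== VERDICT (by name: the statement is the Claim_ definition above) =====
theorem c0_from_k3_eg_spec : Claim_equal_c0_from_k3_eg := by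
  intro D _
  unfold Spec_c0_from_k3_eg
  by_cases h : D = -1 ∨ D = 0 ∨ D = 3 ∨ D = 4 ∨ D = 7 ∨ D = 8
  · rcases h with rfl | rfl | rfl | rfl | rfl | rfl <;> decide
  · rw [a_zero D h, b_zero D h]
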